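-- pv_equiv track=rewrite | github.com/dactechie/MDSValidator_AZFunc | MDSValidator_HttpTrigger/MDSValidator/AOD_MDS/helpers/translators.py | translate_to_MDS_header
-- ===== SOURCE A (Python) =====
-- import copy
--
-- def alias_map_lam(dict_of_alias_mappings): return {alias: official_name
--                                                    for official_name, aliases in dict_of_alias_mappings.items()
--                                                    for alias in aliases}
--
-- def translate_to_MDS_header(header, header_aliases={}):
--     warnings = {}
--     # [cleanse_string(h) for h in header]
--     converted_header = copy.deepcopy(header)
--     headers_map = alias_map_lam(header_aliases)
--     for i, h in enumerate(header):
--         hlow = h  # .lower()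
--         # {alias1 : official_k1}, {alias2 : official_k1}, ...
--         if hlow in headers_map:
--             # save the official MDS value in the new header
--             converted_header[i] = headers_map[hlow]
--             warnings[h] = headers_map[hlow]
--             #warnings[f"Header uses key:{h} instead of {headers_map[hlow]}"] = 1
--
--     return converted_header, warnings
-- ===== SOURCE B (Python) =====
-- def translate_to_MDS_header(header, header_aliases={}):
--     # Staged passes, no inverse alias index and no in-place mutation:
--     # 1) for each cell compute its match (last official whose aliases contain it),
--     # 2) build the converted header by comprehension, 3) build warnings by comprehension.
--     def last_match(h):
--         best = None
--         for official_name, aliases in header_aliases.items():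
--             if h in aliases:
--                 best = official_name
--         return best
--     hits = [last_match(h) for h in header]
--     converted_header = [h if m is None else m for h, m in zip(header, hits)]
--     warnings = {h: m for h, m in zip(header, hits) if m is not None}
--     return converted_header, warnings
-- ===== Notes on version B (the rewrite author's own statement) =====
-- stated objective: alternative
-- what changed: Drops the inverse alias-dict and the single mutating enumerate-loop; B computes a per-cell match list by scanning the mapping directly (last match wins), then builds the converted header and the warnings dict in separate comprehension passes with no mutation.
import Mathlib
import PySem

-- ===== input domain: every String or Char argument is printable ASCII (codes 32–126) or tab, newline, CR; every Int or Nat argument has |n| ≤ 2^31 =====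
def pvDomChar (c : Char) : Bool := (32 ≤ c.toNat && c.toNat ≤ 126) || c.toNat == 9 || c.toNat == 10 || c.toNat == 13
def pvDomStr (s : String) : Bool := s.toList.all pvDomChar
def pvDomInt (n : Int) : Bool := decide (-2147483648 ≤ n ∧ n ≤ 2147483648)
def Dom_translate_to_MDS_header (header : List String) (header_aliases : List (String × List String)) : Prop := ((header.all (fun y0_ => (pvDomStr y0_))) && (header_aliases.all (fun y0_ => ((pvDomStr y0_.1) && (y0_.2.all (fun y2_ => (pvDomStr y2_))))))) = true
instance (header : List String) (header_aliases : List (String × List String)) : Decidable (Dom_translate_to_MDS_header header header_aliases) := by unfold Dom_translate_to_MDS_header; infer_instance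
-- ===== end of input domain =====

-- B replaces A's inverse alias-dict + single mutating enumerate-loop by staged passes:
-- a per-cell last-match scan of the mapping, then converted header and warnings built separately.


-- ===== PORT A =====
-- alias_map_lam: inverse dict {alias : official_name} built by a double comprehension
def alias_map_lam (dict_of_alias_mappings : List (String × List String)) : PySem.Dict String String :=
  dict_of_alias_mappings.foldl
    (fun m p => p.2.foldl (fun m al => m.insert al p.1) m)
    PySem.Dict.empty

def translate_to_MDS_header (header : List String) (header_aliases : List (String × List String)) : List String × (List (String × String)) :=
  let headers_map := alias_map_lam header_aliases
  let st := (PySem.List.enumerate header).foldl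
    (fun (st : List String × PySem.Dict String String) ih =>
      match headers_map.get? ih.2 with
      | some official => (PySem.List.pySetD st.1 ih.1 official, st.2.insert ih.2 official)
      | none => st)
    (header, PySem.Dict.empty)
  (st.1, st.2.items)

-- ===== PORT B =====
-- last_match: last official whose alias list contains h (direct scan, no inverse dict)
def pvLastMatch (header_aliases : List (String × List String)) (h : String) : Option String :=
  header_aliases.foldl (fun best p => if h ∈ p.2 then some p.1 else best) none

def translate_to_MDS_header_alt (header : List String) (header_aliases : List (String × List String)) : List String × (List (String × String)) :=
  let hits := header.map (pvLastMatch header_aliases)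
  let converted_header := (header.zip hits).map
    (fun p => match p.2 with | some m => m | none => p.1)
  let warnings := (header.zip hits).foldl
    (fun (d : PySem.Dict String String) p =>
      match p.2 with | some m => d.insert p.1 m | none => d)
    PySem.Dict.empty
  (converted_header, warnings.items)

-- ===== PRECONDITION & SPEC =====
def Spec_translate_to_MDS_header (header : List String) (header_aliases : List (String × List String)) (out : List String × (List (String × String))) : Prop := out = translate_to_MDS_header_alt header header_aliases
instance (header : List String) (header_aliases : List (String × List String)) (out : List String × (List (String × String))) : Decidable (Spec_translate_to_MDS_header header header_aliases out) := by unfold Spec_translate_to_MDS_header; infer_instance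

-- ===== CLAIM =====
def Claim_equal_translate_to_MDS_header : Prop := ∀ (header : List String) (header_aliases : List (String × List String)), Dom_translate_to_MDS_header header header_aliases → Spec_translate_to_MDS_header header header_aliases (translate_to_MDS_header header header_aliases)

-- ===== LEMMAS AND PROOFS =====

-- looking up h after inserting every alias of a block equals a membership test on the block
lemma get?_foldl_insert_const (aliases : List String) (off : String)
    (m : PySem.Dict String String) (h : String) :
    (aliases.foldl (fun m a => m.insert a off) m).get? h =
      if h ∈ aliases then some off else m.get? h := by
  induction aliases generalizing m with
  | nil => simp
  | cons a as ih =>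
    simp only [List.foldl_cons, ih, List.mem_cons]
    by_cases hmem : h ∈ as
    · simp [hmem]
    · by_cases hea : h = a
      · simp [hea, PySem.Dict.get?_insert_self]
      · simp [hmem, hea, PySem.Dict.get?_insert_of_ne _ _ hea]

-- lookup in A's inverse dict = B's last-wins scan of the mapping
lemma get?_alias_map (header_aliases : List (String × List String)) (h : String) :
    (alias_map_lam header_aliases).get? h = pvLastMatch header_aliases h := by
  unfold alias_map_lam pvLastMatch
  have key : ∀ (l : List (String × List String)) (m : PySem.Dict String String),
      (l.foldl (fun m p => p.2.foldl (fun m a => m.insert a p.1) m) m).get? h =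
        l.foldl (fun acc p => if h ∈ p.2 then some p.1 else acc) (m.get? h) := by
    intro l
    induction l with
    | nil => intro m; rfl
    | cons p rest ih =>
      intro m
      simp only [List.foldl_cons, ih, get?_foldl_insert_const]
  exact key header_aliases PySem.Dict.empty

-- setting the element just past a prefix
lemma set_append_cons (pre : List String) (h v : String) (rs : List String) :
    (pre ++ h :: rs).set pre.length v = pre ++ v :: rs := by
  induction pre with
  | nil => rfl
  | cons x xs ih => simp [ih]

-- A's enumerate-fold, characterised: first component is a map, second a plain fold
lemma a_fold_characterisation (m : PySem.Dict String String) :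
    ∀ (rest pre : List String) (d : PySem.Dict String String),
    ((PySem.List.enumerate rest (pre.length : Int)).foldl
      (fun (st : List String × PySem.Dict String String) ih =>
        match m.get? ih.2 with
        | some official => (PySem.List.pySetD st.1 ih.1 official, st.2.insert ih.2 official)
        | none => st)
      (pre ++ rest, d))
    = (pre ++ rest.map (fun h => match m.get? h with | some o => o | none => h),
       rest.foldl (fun d h => match m.get? h with | some o => d.insert h o | none => d) d) := by
  intro rest
  induction rest with
  | nil => intro pre d; simp [PySem.List.enumerate_nil]
  | cons h rs ih =>
    intro pre d
    rw [PySem.List.enumerate_cons]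
    simp only [List.foldl_cons, List.map_cons]
    cases hm : m.get? h with
    | none =>
      have e1 : pre ++ h :: rs = (pre ++ [h]) ++ rs := by simp
      have e2 : ((pre.length : Int) + 1) = (((pre ++ [h]).length : Nat) : Int) := by
        simp
      simp only [e1, e2, ih (pre ++ [h]) d]
      simp
    | some off =>
      have hset : PySem.List.pySetD (pre ++ h :: rs) ((pre.length : Nat) : Int) off
          = (pre ++ [off]) ++ rs := by
        rw [PySem.List.pySetD_natCast, set_append_cons]; simp
      have e2 : ((pre.length : Int) + 1) = (((pre ++ [off]).length : Nat) : Int) := by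
        simp
      simp only [hset, e2, ih (pre ++ [off]) (d.insert h off)]
      simp

-- B's zip-with-hits map collapses to a single map over the header
lemma b_converted (f : String → Option String) (xs : List String) :
    (xs.zip (xs.map f)).map (fun p => match p.2 with | some m => m | none => p.1)
      = xs.map (fun h => match f h with | some o => o | none => h) := by
  induction xs with
  | nil => rfl
  | cons x l ih => simp [List.zip_cons_cons, ih]

-- B's zip-with-hits fold collapses to a single fold over the header
lemma b_warnings (f : String → Option String) (xs : List String) :
    ∀ (d : PySem.Dict String String),
    (xs.zip (xs.map f)).foldl
      (fun (d : PySem.Dict String String) p =>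
        match p.2 with | some m => d.insert p.1 m | none => d) d
      = xs.foldl (fun d h => match f h with | some o => d.insert h o | none => d) d := by
  induction xs with
  | nil => intro d; rfl
  | cons x l ih => intro d; simp only [List.map_cons, List.zip_cons_cons, List.foldl_cons, ih]

-- ===== VERDICT =====
theorem translate_to_MDS_header_spec : Claim_equal_translate_to_MDS_header := by
  intro header header_aliases _
  unfold Spec_translate_to_MDS_header translate_to_MDS_header translate_to_MDS_header_alt
  have hA := a_fold_characterisation (alias_map_lam header_aliases) header [] PySem.Dict.empty
  simp only [List.length_nil, Nat.cast_zero, List.nil_append, get?_alias_map] at hA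
  simp only [b_converted, b_warnings, get?_alias_map]
  rw [hA]
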